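-- pv_equiv track=rewrite | github.com/Esya-rae/AoC2024 | 21/A2.py | dir_is_valid
-- ===== SOURCE A (Python) =====
-- def to_dir_coord(x):
--     if x == 'A':
--         return 0, 2
--     elif x == '^':
--         return 0, 1
--     elif x == '>':
--         return 1, 2
--     elif x == '<':
--         return 1, 0
--     else:
--         return 1, 1
--
-- def dir_is_valid(x, seq):
--     c_i, c_j = to_dir_coord(x)
--     k = 0
--     while k < len(seq) and (c_i != 0 or c_j != 0):
--         if seq[k] == '^':
--             c_i -= 1
--         elif seq[k] == 'v':
--             c_i += 1
--         elif seq[k] == '<':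
--             c_j -= 1
--         else:
--             c_j += 1
--         k += 1
--     return k == len(seq) and (c_i != 0 or c_j != 0)
-- ===== SOURCE B (Python) =====
-- _DELTA = {'^': (-1, 0), 'v': (1, 0), '<': (0, -1)}
--
-- def to_dir_coord(x):
--     if x == 'A':
--         return 0, 2
--     elif x == '^':
--         return 0, 1
--     elif x == '>':
--         return 1, 2
--     elif x == '<':
--         return 1, 0
--     else:
--         return 1, 1
--
-- def dir_is_valid(x, seq):
--     i, j = to_dir_coord(x)
--     positions = [(i, j)]
--     for c in seq:
--         di, dj = _DELTA.get(c, (0, 1))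
--         i, j = i + di, j + dj
--         positions.append((i, j))
--     return (0, 0) not in positions
-- ===== Notes on version B (the rewrite author's own statement) =====
-- stated objective: alternative
-- what changed: B replaces A's fused while-loop with early exit at the gap by two phases: build the whole trajectory of positions via a delta table, then a single membership test that (0,0) never occurs.
import Mathlib
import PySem

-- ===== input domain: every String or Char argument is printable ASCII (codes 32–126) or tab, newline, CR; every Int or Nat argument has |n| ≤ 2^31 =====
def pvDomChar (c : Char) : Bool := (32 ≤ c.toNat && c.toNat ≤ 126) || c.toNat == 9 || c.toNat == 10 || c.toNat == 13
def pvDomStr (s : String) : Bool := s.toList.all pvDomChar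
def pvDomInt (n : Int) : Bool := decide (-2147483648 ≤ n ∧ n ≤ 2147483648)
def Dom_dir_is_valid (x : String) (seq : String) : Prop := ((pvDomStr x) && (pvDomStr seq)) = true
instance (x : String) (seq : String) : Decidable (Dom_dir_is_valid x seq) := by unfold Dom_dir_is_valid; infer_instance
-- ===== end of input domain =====

-- B replaces A's fused early-exit while-loop by two phases: build the full trajectory, then test that the gap (0,0) never occurs (alternative decomposition, same cost).


-- ===== PORT A =====
def toDirCoord (x : String) : Int × Int :=
  if x = "A" then (0, 2)
  else if x = "^" then (0, 1)
  else if x = ">" then (1, 2)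
  else if x = "<" then (1, 0)
  else (1, 1)

-- A's while loop: advance while chars remain and not at the gap; result k == len(seq) && not at gap.
def dirLoopA : List Char → Int → Int → Bool
  | [], ci, cj => ci ≠ 0 || cj ≠ 0
  | c :: rest, ci, cj =>
    if ci ≠ 0 || cj ≠ 0 then
      if c = '^' then dirLoopA rest (ci - 1) cj
      else if c = 'v' then dirLoopA rest (ci + 1) cj
      else if c = '<' then dirLoopA rest ci (cj - 1)
      else dirLoopA rest ci (cj + 1)
    else false

def dir_is_valid (x : String) (seq : String) : Bool :=
  let c := toDirCoord x
  dirLoopA seq.toList c.1 c.2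

-- ===== PORT B =====
def deltaB (c : Char) : Int × Int :=
  if c = '^' then (-1, 0) else if c = 'v' then (1, 0) else if c = '<' then (0, -1) else (0, 1)

def dir_is_valid_alt (x : String) (seq : String) : Bool :=
  let start := toDirCoord x
  let st := seq.toList.foldl
    (fun (st : List (Int × Int) × (Int × Int)) c =>
      let d := deltaB c
      let q := (st.2.1 + d.1, st.2.2 + d.2)
      (st.1 ++ [q], q))
    ([start], start)
  !st.1.contains ((0 : Int), (0 : Int))

-- ===== PRECONDITION & SPEC =====
def Spec_dir_is_valid (x : String) (seq : String) (out : Bool) : Prop := out = dir_is_valid_alt x seq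
instance (x : String) (seq : String) (out : Bool) : Decidable (Spec_dir_is_valid x seq out) := by unfold Spec_dir_is_valid; infer_instance

-- ===== CLAIM (what is proved, stated in full; the proofs are below) =====
def Claim_equal_dir_is_valid : Prop := ∀ (x : String) (seq : String), Dom_dir_is_valid x seq → Spec_dir_is_valid x seq (dir_is_valid x seq)

-- ===== LEMMAS AND PROOFS =====

-- the trajectory after the start position
def trajB : List Char → Int × Int → List (Int × Int)
  | [], _ => []
  | c :: rest, p =>
    let q := (p.1 + (deltaB c).1, p.2 + (deltaB c).2)
    q :: trajB rest q

theorem foldlB_fst (l : List Char) (acc : List (Int × Int)) (p : Int × Int) :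
    (l.foldl (fun (st : List (Int × Int) × (Int × Int)) c =>
      let d := deltaB c
      let q := (st.2.1 + d.1, st.2.2 + d.2)
      (st.1 ++ [q], q)) (acc, p)).1 = acc ++ trajB l p := by
  induction l generalizing acc p with
  | nil => simp [trajB]
  | cons c rest ih =>
    simp only [List.foldl_cons, trajB, ih]
    simp

theorem dirLoopA_eq (l : List Char) (ci cj : Int) :
    dirLoopA l ci cj = !(((ci, cj) :: trajB l (ci, cj)).contains ((0 : Int), (0 : Int))) := by
  induction l generalizing ci cj with
  | nil =>
    simp [dirLoopA, trajB, Prod.ext_iff, eq_comm]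
  | cons c rest ih =>
    by_cases hz : ci = 0 ∧ cj = 0
    · obtain ⟨h1, h2⟩ := hz
      subst h1; subst h2
      rw [List.contains_cons]
      have hh : ((((0 : Int), (0 : Int))) == (((0 : Int), (0 : Int)))) = true := rfl
      rw [hh, Bool.true_or]
      simp only [dirLoopA]
      norm_num
    · have hmem : ((((0 : Int), (0 : Int))) == ((ci, cj))) = false := by
        simp [Prod.ext_iff]; tauto
      have htraj : trajB (c :: rest) (ci, cj) =
          (ci + (deltaB c).1, cj + (deltaB c).2) ::
            trajB rest (ci + (deltaB c).1, cj + (deltaB c).2) := rfl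
      rw [htraj, List.contains_cons, hmem, Bool.false_or,
        ← ih (ci + (deltaB c).1) (cj + (deltaB c).2)]
      have hne : (decide (ci ≠ 0) || decide (cj ≠ 0)) = true := by
        simp; tauto
      simp only [dirLoopA, hne, if_true]
      by_cases h1 : c = '^'
      · subst h1; simp [deltaB, sub_eq_add_neg]
      · by_cases h2 : c = 'v'
        · subst h2; simp [h1, deltaB]
        · by_cases h3 : c = '<'
          · subst h3; simp [h1, h2, deltaB, sub_eq_add_neg]
          · simp [h1, h2, h3, deltaB]

-- ===== VERDICT (by name: the statement is the Claim_ definition above) =====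
theorem dir_is_valid_spec : Claim_equal_dir_is_valid := by
  intro x seq _
  unfold Spec_dir_is_valid dir_is_valid dir_is_valid_alt
  rw [dirLoopA_eq]
  simp only [foldlB_fst]
  simp
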